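-- pv_equiv track=rewrite | github.com/ctomatis/curly-robot | backend/app/services/pdf_parser.py | clean_item
-- ===== SOURCE A (Python) =====
-- def clean_item(line):
--     val = ""
--     for c in line:
--         if not c.strip():
--             continue
--
--         if c.isupper():
--             val = c
--             continue
--
--         if val:
--             val += c
--     return val
-- ===== SOURCE B (Python) =====
-- def clean_item(line):
--     last = -1
--     for i, c in enumerate(line):
--         if c.isupper():
--             last = i
--     if last < 0:
--         return ""
--     return "".join(c for c in line[last:] if c.strip())
-- ===== Notes on version B (the rewrite author's own statement) =====
-- stated objective: alternative
-- what changed: Replaces A's single accumulate-and-reset loop with a two-pass locate-then-extract: first find the index of the last uppercase character, then join the non-whitespace characters of the tail slice.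
import Mathlib
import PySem

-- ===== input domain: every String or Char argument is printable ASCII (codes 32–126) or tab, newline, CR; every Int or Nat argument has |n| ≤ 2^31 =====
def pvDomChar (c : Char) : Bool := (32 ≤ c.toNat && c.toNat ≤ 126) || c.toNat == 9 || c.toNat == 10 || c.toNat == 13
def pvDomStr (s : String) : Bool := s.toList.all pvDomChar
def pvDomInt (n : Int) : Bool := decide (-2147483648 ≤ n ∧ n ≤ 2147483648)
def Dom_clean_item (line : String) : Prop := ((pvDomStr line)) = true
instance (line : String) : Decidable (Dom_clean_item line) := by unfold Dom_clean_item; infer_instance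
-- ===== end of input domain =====

-- B re-derives A's value by a two-pass locate-then-extract instead of A's accumulate-and-reset loop (alternative decomposition, same cost).

-- ===== PORT A =====
-- one loop step of A: skip whitespace; an uppercase char resets val; otherwise append if val is nonempty
def cleanStepA (val : List Char) (c : Char) : List Char :=
  if (PySem.Chars.strip [c]).isEmpty then val
  else if PySem.Chars.isupper c then [c]
  else if !val.isEmpty then val ++ [c]
  else val

def clean_item (line : String) : String :=
  String.ofList (line.toList.foldl cleanStepA [])

-- ===== PORT B =====
-- first pass of Source B: index of the last uppercase character, -1 if none
def lastUpper (cs : List Char) : Int :=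
  (PySem.List.enumerate cs 0).foldl
    (fun acc p => if PySem.Chars.isupper p.2 then p.1 else acc) (-1)

def clean_item_alt (line : String) : String :=
  let cs := line.toList
  let last := lastUpper cs
  if last < 0 then ""
  else String.ofList
    ((PySem.List.slice cs (some last) none).filter
      (fun c => !(PySem.Chars.strip [c]).isEmpty))

-- ===== PRECONDITION & SPEC =====
def Spec_clean_item (line : String) (out : String) : Prop := out = clean_item_alt line
instance (line : String) (out : String) : Decidable (Spec_clean_item line out) := by unfold Spec_clean_item; infer_instance

-- ===== CLAIM (what is proved, stated in full; the proofs are below) =====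
def Claim_equal_clean_item : Prop := ∀ (line : String), Dom_clean_item line → Spec_clean_item line (clean_item line)

-- ===== LEMMAS AND PROOFS =====

theorem strip_singleton (c : Char) :
    PySem.Chars.strip [c] = if PySem.Chars.isspace c then [] else [c] := by
  by_cases h : PySem.Chars.isspace c <;>
    simp [PySem.Chars.strip, PySem.Chars.lstrip, PySem.Chars.rstrip, List.dropWhile, h]

theorem isupper_not_isspace (c : Char) (h : PySem.Chars.isupper c = true) :
    PySem.Chars.isspace c = false := by
  simp [PySem.Chars.isupper] at h
  simp [PySem.Chars.isspace]
  have h1 : 65 ≤ c.toNat := h.1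
  have h2 : c.toNat ≤ 90 := h.2
  omega

theorem enumerate_append_singleton (xs : List Char) (c : Char) (s : Int) :
    PySem.List.enumerate (xs ++ [c]) s
      = PySem.List.enumerate xs s ++ [(s + xs.length, c)] := by
  induction xs generalizing s with
  | nil => simp [PySem.List.enumerate_nil, PySem.List.enumerate_cons]
  | cons x xs ih =>
      simp [PySem.List.enumerate_cons, ih]
      ring_nf

theorem lastUpper_append (xs : List Char) (c : Char) :
    lastUpper (xs ++ [c])
      = if PySem.Chars.isupper c then (xs.length : Int) else lastUpper xs := by
  unfold lastUpper
  rw [enumerate_append_singleton, List.foldl_append]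
  simp

-- the invariant A's loop carries, stated against B's two-pass description
theorem main_inv (cs : List Char) :
    cs.foldl cleanStepA []
        = (if lastUpper cs < 0 then []
           else (cs.drop (lastUpper cs).toNat).filter
                  (fun c => !(PySem.Chars.strip [c]).isEmpty))
      ∧ (lastUpper cs < 0 → cs.foldl cleanStepA [] = [])
      ∧ (0 ≤ lastUpper cs →
          cs.foldl cleanStepA [] ≠ [] ∧ (lastUpper cs).toNat < cs.length) := by
  induction cs using List.reverseRecOn with
  | nil => simp [lastUpper, PySem.List.enumerate_nil]
  | append_singleton xs c ih =>
      obtain ⟨hA, hneg, hpos⟩ := ih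
      rw [List.foldl_append, lastUpper_append]
      simp only [List.foldl_cons, List.foldl_nil]
      by_cases hup : PySem.Chars.isupper c = true
      · -- uppercase: A resets, B's last index moves here
        have hsp := isupper_not_isspace c hup
        have hf : (PySem.Chars.strip [c]).isEmpty = false := by
          rw [strip_singleton, hsp]; simp
        rw [if_pos hup]
        have hstep : cleanStepA (xs.foldl cleanStepA []) c = [c] := by
          simp [cleanStepA, hf, hup]
        rw [hstep]
        refine ⟨?_, fun h => absurd h (by omega), fun _ => ⟨by simp, by simp⟩⟩
        rw [if_neg (by omega), show ((xs.length : Int)).toNat = xs.length by simp,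
            List.drop_left, List.filter_singleton]
        simp [hf]
      · rw [if_neg hup]
        by_cases hws : PySem.Chars.isspace c = true
        · -- whitespace: A skips it, B's filter drops it
          have hf : (PySem.Chars.strip [c]).isEmpty = true := by
            rw [strip_singleton, hws]; rfl
          have hstep : cleanStepA (xs.foldl cleanStepA []) c = xs.foldl cleanStepA [] := by
            simp [cleanStepA, hf]
          rw [hstep]
          refine ⟨?_, hneg, ?_⟩
          · rw [hA]
            by_cases hlt : lastUpper xs < 0
            · rw [if_pos hlt, if_pos hlt]
            · have hlen := (hpos (le_of_not_gt hlt)).2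
              rw [if_neg hlt, if_neg hlt,
                  List.drop_append_of_le_length (by omega), List.filter_append,
                  List.filter_singleton]
              simp [hf]
          · intro h0
            refine ⟨(hpos h0).1, ?_⟩
            have := (hpos h0).2
            simp
            omega
        · -- ordinary char: appended iff val is already nonempty
          have hf : (PySem.Chars.strip [c]).isEmpty = false := by
            rw [strip_singleton, if_neg hws]; simp
          by_cases hlt : lastUpper xs < 0
          · have h0 := hneg hlt
            have hstep : cleanStepA (xs.foldl cleanStepA []) c = xs.foldl cleanStepA [] := by
              rw [h0]; simp [cleanStepA, hf, hup]
            rw [hstep, h0]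
            exact ⟨by rw [if_pos hlt], fun _ => rfl, fun h => absurd hlt (by omega)⟩
          · obtain ⟨hne, hlen⟩ := hpos (le_of_not_gt hlt)
            have hstep : cleanStepA (xs.foldl cleanStepA []) c
                = xs.foldl cleanStepA [] ++ [c] := by
              simp [cleanStepA, hf, hup, hne]
            rw [hstep, hA, if_neg hlt, if_neg hlt,
                List.drop_append_of_le_length (by omega), List.filter_append,
                List.filter_singleton]
            refine ⟨by simp [hf], fun h => absurd hlt (by omega), fun _ => ⟨by simp, ?_⟩⟩
            simp
            omega

-- ===== VERDICT (by name: the statement is the Claim_ definition above) =====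
theorem clean_item_spec : Claim_equal_clean_item := by
  intro line _
  unfold Spec_clean_item clean_item clean_item_alt
  obtain ⟨hA, -, -⟩ := main_inv line.toList
  by_cases h : lastUpper line.toList < 0
  · simp only [hA, h, if_pos]
  · rw [if_neg h] at hA
    rw [hA]
    simp only [h, if_neg, if_false]
    rw [PySem.List.slice_from line.toList (by omega)]
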